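-- pv_equiv track=rewrite | github.com/YejiGong/problem-solve | boj/9527.py | f
-- ===== SOURCE A (Python) =====
-- def f(n):
--     count = 0
--     k=0
--
--     while 2**k<=n:
--         p=2**(k+1)
--         p_count=(n+1)//p
--
--         count+=p_count*(p//2) #p_count//2
--
--         left=(n+1)%p
--         count+=max(0,left-p//2)
--
--         k+=1
--
--     return count
-- ===== SOURCE B (Python) =====
-- def f(n):
--     def pc(x):
--         c = 0
--         while x:
--             c += x & 1
--             x >>= 1
--         return c
--
--     def T(m):
--         # sum of popcounts of 0..m-1, by halving: T(2k)=2T(k)+k, T(2k+1)=2T(k)+k+pc(k)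
--         if m <= 0:
--             return 0
--         k, r = divmod(m, 2)
--         s = 2 * T(k) + k
--         if r:
--             s += pc(k)
--         return s
--
--     return T(n + 1)
-- ===== Notes on version B (the rewrite author's own statement) =====
-- stated objective: alternative
-- what changed: Replaces A's per-bit-position closed-form counting loop with a recursive halving scheme T(2k)=2T(k)+k, T(2k+1)=2T(k)+k+popcount(k) on m=n+1.
import Mathlib
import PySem

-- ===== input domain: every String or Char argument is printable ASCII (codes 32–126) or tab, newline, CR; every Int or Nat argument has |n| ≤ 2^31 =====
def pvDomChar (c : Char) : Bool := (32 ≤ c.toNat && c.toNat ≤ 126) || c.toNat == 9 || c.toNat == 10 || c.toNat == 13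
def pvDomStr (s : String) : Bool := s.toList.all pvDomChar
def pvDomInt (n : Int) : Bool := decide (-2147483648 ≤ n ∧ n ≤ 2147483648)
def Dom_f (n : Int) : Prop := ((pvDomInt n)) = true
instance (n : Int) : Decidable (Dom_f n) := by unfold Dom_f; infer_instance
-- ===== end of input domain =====

-- B computes the same total by a recursive halving scheme T(2k)=2T(k)+k, T(2k+1)=2T(k)+k+popcount(k) on m=n+1 (alternative); A counts per bit position in closed form.

-- ===== PORT A =====
-- the while loop of A: state (count, k); terminates because 2^k grows past n
def fLoop (n count : Int) (k : Nat) : Int :=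
  if h : (2:Int)^k ≤ n then
    let p : Int := 2^(k+1)
    let p_count : Int := PySem.Int.floordiv (n+1) p
    let count1 : Int := count + p_count * PySem.Int.floordiv p 2
    let left : Int := PySem.Int.mod (n+1) p
    let count2 : Int := count1 + max 0 (left - PySem.Int.floordiv p 2)
    fLoop n count2 (k+1)
  else
    count
termination_by (n + 1 - 2^k).toNat
decreasing_by
  have h1 : (0:Int) < 2^k := pow_pos (by norm_num) k
  have _h2 : (2:Int)^(k+1) = 2 * 2^k := by rw [pow_succ]; ring
  omega


def f (n : Int) : Int := fLoop n 0 0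

-- ===== PORT B =====
-- the while loop of pc; guard '0 < x' makes it total ('while x:' — x is never negative where pc is called)
def pcLoop (x c : Int) : Int :=
  if _h : 0 < x then pcLoop (PySem.Int.floordiv x 2) (c + PySem.Int.band x 1) else c
termination_by x.toNat
decreasing_by
  rw [PySem.Int.floordiv_eq_ediv_of_pos (by norm_num)]
  omega

-- pc(x): count the set bits of x by shifting
def pc (x : Int) : Int := pcLoop x 0

-- T(m): sum of popcounts of 0..m-1 by halving
def T (m : Int) : Int :=
  if _h : m ≤ 0 then 0
  else
    let k : Int := PySem.Int.floordiv m 2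
    let r : Int := PySem.Int.mod m 2
    let s : Int := 2 * T k + k
    if r ≠ 0 then s + pc k else s
termination_by m.toNat
decreasing_by
  rw [PySem.Int.floordiv_eq_ediv_of_pos (by norm_num)]
  omega

def f_alt (n : Int) : Int := T (n + 1)

-- ===== PRECONDITION & SPEC =====
def Spec_f (n : Int) (out : Int) : Prop := out = f_alt n
instance (n : Int) (out : Int) : Decidable (Spec_f n out) := by unfold Spec_f; infer_instance

-- ===== CLAIM (what is proved, stated in full; the proofs are below) =====
def Claim_equal_f : Prop := ∀ (n : Int), Dom_f n → Spec_f n (f n)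

-- ===== LEMMAS AND PROOFS =====

-- plain binary popcount of a natural number (proof-side specification)
def popcount : Nat → Nat
  | 0 => 0
  | (m+1) => ((m+1) % 2) + popcount ((m+1) / 2)

-- sum over 0..m-1 of popcount of the bits from position k upward
def SB (m k : Nat) : Nat := ∑ i ∈ Finset.range m, popcount (i / 2^k)

theorem popcount_split (t : Nat) : popcount t = t % 2 + popcount (t / 2) := by
  cases t with
  | zero => simp [popcount]
  | succ m => rw [popcount]

-- number of i < m with bit k set, in closed form (A's per-iteration increment)
theorem bit_sum (k : Nat) : ∀ m : Nat,
    (∑ i ∈ Finset.range m, (i / 2^k % 2)) = (m / 2^(k+1)) * 2^k + (m % 2^(k+1) - 2^k) := by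
  intro m
  induction m with
  | zero => simp
  | succ m ih =>
    rw [Finset.sum_range_succ, ih]
    have hH : (1:Nat) ≤ 2^k := Nat.one_le_two_pow
    have hP : (2:Nat)^(k+1) = 2 * 2^k := by rw [pow_succ]; ring
    set H := 2^k with hHdef
    set q := m / (2^(k+1)) with hq
    set r := m % (2^(k+1)) with hr
    have hdm : m = 2^(k+1) * q + r := (Nat.div_add_mod m (2^(k+1))).symm.trans (by ring)
    have hrlt : r < 2^(k+1) := Nat.mod_lt _ (by positivity)
    -- bit of m: m / H % 2 = r / H
    have hbit : m / H % 2 = r / H := by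
      have hm2 : m = H * (2 * q) + r := by rw [hdm, hP]; ring
      have hdiv : m / H = 2 * q + r / H := by rw [hm2, Nat.mul_add_div (by omega)]
      have hrH : r / H < 2 := Nat.div_lt_of_lt_mul (by omega)
      rw [hdiv, Nat.mul_add_mod, Nat.mod_eq_of_lt hrH]
    have hrHlt : r / H < 2 := Nat.div_lt_of_lt_mul (by omega)
    have hrHle : r / H = if r < H then 0 else 1 := by
      split
      · exact Nat.div_eq_of_lt (by omega)
      · have a := (Nat.le_div_iff_mul_le (by omega : 0 < H)).mpr (by omega : 1*H ≤ r)
        omega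
    by_cases hcase : r + 1 < 2^(k+1)
    · -- no carry into position k+1
      have hsplit : m + 1 = 2^(k+1) * q + (r+1) := by omega
      have hd1 : (m+1) / 2^(k+1) = q := by
        rw [hsplit, Nat.mul_add_div (by positivity), Nat.div_eq_of_lt hcase]
        omega
      have hd2 : (m+1) % 2^(k+1) = r + 1 := by
        rw [hsplit, Nat.mul_add_mod, Nat.mod_eq_of_lt hcase]
      rw [hd1, hd2, hbit, hrHle]
      split <;> omega
    · -- carry: r+1 = 2^(k+1)
      have hrtop : r + 1 = 2^(k+1) := by omega
      have hm1 : m + 1 = 2^(k+1) * (q+1) := by rw [mul_add, mul_one]; omega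
      have hd1 : (m+1) / 2^(k+1) = q + 1 := by
        rw [hm1, Nat.mul_div_cancel_left _ (by positivity)]
      have hd2 : (m+1) % 2^(k+1) = 0 := by rw [hm1, Nat.mul_mod_right]
      rw [hd1, hd2, hbit, hrHle]
      have hgoal : (q+1) * H = q * H + H := by ring
      split <;> omega

theorem SB_split (m k : Nat) :
    SB m k = (m / 2^(k+1)) * 2^k + (m % 2^(k+1) - 2^k) + SB m (k+1) := by
  unfold SB
  rw [← bit_sum k m, ← Finset.sum_add_distrib]
  apply Finset.sum_congr rfl
  intro i _
  rw [popcount_split (i / 2^k), Nat.div_div_eq_div_mul, ← pow_succ]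

theorem SB_zero_of_ge (m k : Nat) (h : m ≤ 2^k) : SB m k = 0 := by
  unfold SB
  apply Finset.sum_eq_zero
  intro i hi
  rw [Finset.mem_range] at hi
  rw [Nat.div_eq_of_lt (by omega), popcount]

-- the loop invariant: fLoop adds the popcounts of the bits from position k upward
theorem fLoop_eq (n : Int) (hn : 0 ≤ n) : ∀ (count : Int) (k : Nat),
    fLoop n count k = count + (SB (n+1).toNat k : Int) := by
  intro count k
  induction count, k using fLoop.induct n with
  | case1 count k h p p_count count1 left count2 ih =>
    rw [fLoop, dif_pos h, ih]
    have hm : ((n+1).toNat : Int) = n + 1 := by omega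
    have hppos : (0:Int) < 2^(k+1) := by positivity
    have hpcast : ((2^(k+1) : Nat) : Int) = 2^(k+1) := by push_cast; ring
    have hpc : p_count = (((n+1).toNat / 2^(k+1) : Nat) : Int) := by
      show PySem.Int.floordiv (n+1) (2^(k+1)) = _
      conv_lhs => rw [← hm, ← hpcast]
      rw [PySem.Int.floordiv_natCast]
    have hleft : left = (((n+1).toNat % 2^(k+1) : Nat) : Int) := by
      show PySem.Int.mod (n+1) (2^(k+1)) = _
      conv_lhs => rw [← hm, ← hpcast]
      rw [PySem.Int.mod_natCast]
    have hhalf : PySem.Int.floordiv p 2 = ((2^k : Nat) : Int) := by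
      show PySem.Int.floordiv (2^(k+1)) 2 = _
      conv_lhs => rw [← hpcast, show (2:Int) = ((2:Nat):Int) from rfl]
      rw [PySem.Int.floordiv_natCast]
      have : (2:Nat)^(k+1)/2 = 2^k := by
        rw [pow_succ, Nat.mul_div_cancel _ (by norm_num)]
      rw [this]
    rw [show count2 = count1 + max 0 (left - PySem.Int.floordiv p 2) from rfl,
        show count1 = count + p_count * PySem.Int.floordiv p 2 from rfl,
        hpc, hleft, hhalf]
    rw [SB_split (n+1).toNat k]
    have hmul : ((((n+1).toNat / 2^(k+1) * 2^k : Nat)) : Int)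
        = (((n+1).toNat / 2^(k+1) : Nat) : Int) * ((2^k : Nat) : Int) := by
      push_cast; ring
    have h1 : (1:Nat) ≤ 2^k := Nat.one_le_two_pow
    have hmod : (n+1).toNat % 2^(k+1) < 2^(k+1) := Nat.mod_lt _ (by positivity)
    omega
  | case2 count k h =>
    rw [fLoop, dif_neg h]
    have h2 : n < 2^k := by omega
    have hk : (n+1).toNat ≤ 2^k := by
      have : ((2:Nat)^k : Int) = (2:Int)^k := by push_cast; ring
      omega
    rw [SB_zero_of_ge _ _ hk]
    simp

-- the pc while-loop computes popcount
theorem pcLoop_eq : ∀ (x c : Int), 0 ≤ x → pcLoop x c = c + (popcount x.toNat : Int) := by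
  intro x c
  induction x, c using pcLoop.induct with
  | case1 x c h ih =>
    intro _
    rw [pcLoop, dif_pos h]
    have hdiv : PySem.Int.floordiv x 2 = ((x.toNat / 2 : Nat) : Int) := by
      rw [PySem.Int.floordiv_eq_ediv_of_pos (by norm_num)]
      omega
    have hband : PySem.Int.band x 1 = ((x.toNat % 2 : Nat) : Int) := by
      rw [PySem.Int.band_one, PySem.Int.mod_eq_emod_of_pos (by norm_num)]
      omega
    rw [ih (by rw [hdiv]; positivity), hdiv, hband]
    rw [popcount_split x.toNat]
    simp only [Int.toNat_natCast]
    push_cast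
    omega
  | case2 x c h =>
    intro hx
    rw [pcLoop, dif_neg h]
    have hx0 : x.toNat = 0 := by omega
    rw [hx0, popcount]
    simp

-- the halving recurrences of the popcount sum
theorem sum_pc_two_mul (k : Nat) :
    (∑ i ∈ Finset.range (2*k), popcount i) = 2 * (∑ i ∈ Finset.range k, popcount i) + k ∧
    (∑ i ∈ Finset.range (2*k+1), popcount i) = 2 * (∑ i ∈ Finset.range k, popcount i) + k + popcount k := by
  induction k with
  | zero => simp [popcount]
  | succ k ih =>
    have hodd : popcount (2*k+1) = 1 + popcount k := by
      rw [popcount_split (2*k+1)]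
      congr 1
      · omega
      · congr 1; omega
    have heven : popcount (2*k) = popcount k := by
      rw [popcount_split (2*k)]
      have h1 : 2*k % 2 = 0 := by omega
      have h2 : 2*k / 2 = k := by omega
      rw [h1, h2]; omega
    constructor
    · have h : 2*(k+1) = (2*k+1) + 1 := by ring
      rw [h, Finset.sum_range_succ, ih.2, hodd, Finset.sum_range_succ]
      ring
    · have h : 2*(k+1)+1 = (2*(k+1)) + 1 := by ring
      have h2 : 2*(k+1) = (2*k+1) + 1 := by ring
      have heven' : popcount (2*(k+1)) = popcount (k+1) := by
        rw [popcount_split (2*(k+1))]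
        have a1 : 2*(k+1) % 2 = 0 := by omega
        have a2 : 2*(k+1) / 2 = k+1 := by omega
        rw [a1, a2]; omega
      rw [h, Finset.sum_range_succ, heven', h2, Finset.sum_range_succ, ih.2, hodd,
          Finset.sum_range_succ]
      ring

-- T(m) equals the plain popcount sum over 0..m-1
theorem T_eq (m : Int) : T m = ((∑ i ∈ Finset.range m.toNat, popcount i : Nat) : Int) := by
  induction m using T.induct with
  | case1 m h =>
    rw [T, dif_pos h]
    have h0 : m.toNat = 0 := by omega
    rw [h0]
    simp
  | case2 m h kk rr hr ih =>
    have hkk : kk = PySem.Int.floordiv m 2 := rfl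
    have hrr : rr = PySem.Int.mod m 2 := rfl
    have hk : PySem.Int.floordiv m 2 = ((m.toNat / 2 : Nat) : Int) := by
      rw [PySem.Int.floordiv_eq_ediv_of_pos (by norm_num)]
      omega
    have hpar : m.toNat % 2 = 1 := by
      rw [hrr, PySem.Int.mod_eq_emod_of_pos (by norm_num)] at hr
      omega
    have ihT : T (((m.toNat / 2 : Nat) : Int)) = ((∑ i ∈ Finset.range (m.toNat / 2), popcount i : Nat) : Int) := by
      rw [← hk, ← hkk, ih, hkk, hk, Int.toNat_natCast]
    have hpcT : pc (((m.toNat / 2 : Nat) : Int)) = ((popcount (m.toNat / 2) : Nat) : Int) := by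
      show pcLoop _ 0 = _
      rw [pcLoop_eq _ 0 (by positivity)]
      simp only [Int.toNat_natCast, zero_add]
    rw [T, dif_neg h, if_pos (hrr ▸ hr), hk, ihT, hpcT]
    have hmm : m.toNat = 2 * (m.toNat / 2) + 1 := by omega
    conv_rhs => rw [hmm]
    rw [(sum_pc_two_mul (m.toNat / 2)).2]
    push_cast
    ring
  | case3 m h kk rr hr ih =>
    have hkk : kk = PySem.Int.floordiv m 2 := rfl
    have hrr : rr = PySem.Int.mod m 2 := rfl
    have hk : PySem.Int.floordiv m 2 = ((m.toNat / 2 : Nat) : Int) := by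
      rw [PySem.Int.floordiv_eq_ediv_of_pos (by norm_num)]
      omega
    have hpar : m.toNat % 2 = 0 := by
      rw [hrr, PySem.Int.mod_eq_emod_of_pos (by norm_num)] at hr
      omega
    have ihT : T (((m.toNat / 2 : Nat) : Int)) = ((∑ i ∈ Finset.range (m.toNat / 2), popcount i : Nat) : Int) := by
      rw [← hk, ← hkk, ih, hkk, hk, Int.toNat_natCast]
    rw [T, dif_neg h, if_neg (hrr ▸ hr), hk, ihT]
    have hmm : m.toNat = 2 * (m.toNat / 2) := by omega
    conv_rhs => rw [hmm]
    rw [(sum_pc_two_mul (m.toNat / 2)).1]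
    push_cast
    ring

theorem SB_zero_eq (m : Nat) : SB m 0 = ∑ i ∈ Finset.range m, popcount i := by
  unfold SB
  simp

-- ===== VERDICT (by name: the statement is the Claim_ definition above) =====
theorem f_spec : Claim_equal_f := by
  intro n _
  unfold Spec_f f f_alt
  rw [T_eq (n+1)]
  by_cases hn : 0 ≤ n
  · rw [fLoop_eq n hn 0 0, SB_zero_eq]
    simp
  · have hneg : ¬ (2:Int)^0 ≤ n := by norm_num; omega
    rw [fLoop, dif_neg hneg]
    have : (n+1).toNat = 0 := by omega
    rw [this]
    simp
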